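-- pv_equiv track=rewrite | github.com/KernAlan/osint-monitor | osint_monitor/api/auth.py | _is_exempt
-- ===== SOURCE A (Python) =====
-- _EXEMPT_PREFIXES = ("/docs", "/openapi.json", "/redoc", "/static/")
--
-- _EXEMPT_EXACT = {"/", "/docs", "/openapi.json"}
--
-- def _is_exempt(path: str) -> bool:
--     """Return True if *path* should skip API-key checks."""
--     if path in _EXEMPT_EXACT:
--         return True
--     for prefix in _EXEMPT_PREFIXES:
--         if path.startswith(prefix):
--             return True
--     # All non-API paths (HTML pages) are exempt.
--     if not path.startswith("/api/"):
--         return True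
--     return False
-- ===== SOURCE B (Python) =====
-- def _is_exempt(path: str) -> bool:
--     """Return True if *path* should skip API-key checks."""
--     # every exact/prefix exemption lies outside /api/, so a single test suffices
--     return not path.startswith("/api/")
-- ===== Notes on version B (the rewrite author's own statement) =====
-- stated objective: simpler
-- what changed: Dropped the exact-match set and the prefix loop: every exempt entry already lies outside the /api/ subtree, so B is a single prefix test on /api/ with the result negated.
import Mathlib
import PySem

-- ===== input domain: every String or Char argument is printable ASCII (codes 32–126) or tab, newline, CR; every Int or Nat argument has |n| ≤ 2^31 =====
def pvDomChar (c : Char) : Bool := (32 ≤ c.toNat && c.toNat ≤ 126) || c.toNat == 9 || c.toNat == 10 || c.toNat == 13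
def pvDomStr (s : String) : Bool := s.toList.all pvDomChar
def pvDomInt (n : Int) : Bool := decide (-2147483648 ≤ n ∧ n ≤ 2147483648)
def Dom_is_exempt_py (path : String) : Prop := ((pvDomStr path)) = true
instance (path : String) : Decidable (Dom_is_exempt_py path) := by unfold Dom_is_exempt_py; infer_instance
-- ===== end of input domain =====

-- B replaces A's exact-match set and prefix loop by the single test `not path.startswith("/api/")` (simpler; same value everywhere).

-- ===== PORT A =====
def pvExemptPrefixes : List String := ["/docs", "/openapi.json", "/redoc", "/static/"]

def pvExemptExact : PySem.Set String := PySem.Set.ofList ["/", "/docs", "/openapi.json"]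

def is_exempt_py (path : String) : Bool :=
  if PySem.Set.contains pvExemptExact path then true
  else if pvExemptPrefixes.any (fun prefix_ => PySem.Str.startswith path prefix_) then true
  else if !(PySem.Str.startswith path "/api/") then true
  else false

-- ===== PORT B =====
def is_exempt_py_alt (path : String) : Bool :=
  !(PySem.Str.startswith path "/api/")

-- ===== PRECONDITION & SPEC =====
def Spec_is_exempt_py (path : String) (out : Bool) : Prop := out = is_exempt_py_alt path
instance (path : String) (out : Bool) : Decidable (Spec_is_exempt_py path out) := by unfold Spec_is_exempt_py; infer_instance

-- ===== CLAIM (what is proved, stated in full; the proofs are below) =====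
def Claim_equal_is_exempt_py : Prop := ∀ (path : String), Dom_is_exempt_py path → Spec_is_exempt_py path (is_exempt_py path)

-- ===== LEMMAS AND PROOFS =====

-- if path starts with p, and neither of p and "/api/" is a prefix of the other,
-- then path does not start with "/api/"
theorem not_api_of_startswith (path p : String)
    (h : PySem.Str.startswith path p = true)
    (h1 : ¬ ("/api/".toList <+: p.toList)) (h2 : ¬ (p.toList <+: "/api/".toList)) :
    PySem.Str.startswith path "/api/" = false := by
  by_contra hc
  rw [Bool.not_eq_false] at hc
  simp only [PySem.Str.startswith_eq, PySem.Chars.startswith_iff] at h hc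
  rcases List.prefix_or_prefix_of_prefix h hc with hp | hp
  · exact h2 hp
  · exact h1 hp

theorem is_exempt_py_eq_alt (path : String) : is_exempt_py path = is_exempt_py_alt path := by
  unfold is_exempt_py is_exempt_py_alt
  by_cases hx : PySem.Set.contains pvExemptExact path = true
  · have hmem : path = "/" ∨ path = "/docs" ∨ path = "/openapi.json" := by
      have := (PySem.Set.contains_iff pvExemptExact path).mp hx
      simpa [pvExemptExact, PySem.Set.mem_ofList] using this
    rcases hmem with h | h | h
    all_goals (subst h; decide)
  · by_cases hp : pvExemptPrefixes.any (fun prefix_ => PySem.Str.startswith path prefix_) = true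
    · rcases List.any_eq_true.mp hp with ⟨p, hpmem, hps⟩
      have hfalse : PySem.Str.startswith path "/api/" = false := by
        simp only [pvExemptPrefixes, List.mem_cons, List.not_mem_nil, or_false] at hpmem
        rcases hpmem with h | h | h | h
        all_goals (subst h; exact not_api_of_startswith path _ hps (by decide) (by decide))
      simp only [PySem.Str.startswith_eq] at hfalse
      rw [show ("/api/".toList) = ['/', 'a', 'p', 'i', '/'] from rfl] at hfalse
      simp [hfalse]
    · simp [Bool.not_eq_true] at hx hp
      simp [hx]
      intro x hxm hsx
      exact absurd hsx (by simp [hp x hxm])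

-- ===== VERDICT (by name: the statement is the Claim_ definition above) =====
theorem is_exempt_py_spec : Claim_equal_is_exempt_py := by
  intro path _
  unfold Spec_is_exempt_py
  exact is_exempt_py_eq_alt path
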